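-- pv_equiv track=rewrite | github.com/ForceANature110/RollerDerbyTools | tools/annotation_to_statsbook.py | sort_skater_numbers
-- ===== SOURCE A (Python) =====
-- def as_text(value):
--     """
--     Preserve skater/jammer numbers like '00', '02', '0191'.
--     """
--     if value is None:
--         return ""
--     return str(value)
--
-- def sort_skater_numbers(numbers):
--     """
--     Sort skater numbers numerically where possible, while preserving
--     original text formatting like leading zeros.
--     """
--     def sort_key(x):
--         s = as_text(x).strip()
--         if s.isdigit():
--             return (0, int(s), s)
--         return (1, s)
--
--     cleaned = [as_text(n) for n in numbers if as_text(n).strip() != ""]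
--     return sorted(cleaned, key=sort_key)
-- ===== SOURCE B (Python) =====
-- def as_text(value):
--     if value is None:
--         return ""
--     return str(value)
--
-- def _precedes(a, b):
--     # True iff a must come strictly before b in the final order
--     sa, sb = a.strip(), b.strip()
--     da, db = sa.isdigit(), sb.isdigit()
--     if da != db:
--         return da
--     if da and int(sa) != int(sb):
--         return int(sa) < int(sb)
--     return sa < sb
--
-- def sort_skater_numbers(numbers):
--     # single pass: binary-search the insertion point of each kept entry
--     # in the growing sorted result (insert after equals keeps stability)
--     result = []
--     for n in numbers:
--         s = as_text(n)
--         if s.strip() == "":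
--             continue
--         lo, hi = 0, len(result)
--         while lo < hi:
--             mid = (lo + hi) // 2
--             if _precedes(s, result[mid]):
--                 hi = mid
--             else:
--                 lo = mid + 1
--         result.insert(lo, s)
--     return result
-- ===== Notes on version B (the rewrite author's own statement) =====
-- stated objective: alternative
-- what changed: A builds the cleaned list and hands it to sorted() under a composite tuple key (0,int(s),s)/(1,s); B makes one pass over the input, binary-searching each non-blank entry's insertion point in the growing sorted result with a direct three-way comparator (digit-ness, then int value, then stripped string) and inserting there -- no key tuples and no library sort.
import Mathlib
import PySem

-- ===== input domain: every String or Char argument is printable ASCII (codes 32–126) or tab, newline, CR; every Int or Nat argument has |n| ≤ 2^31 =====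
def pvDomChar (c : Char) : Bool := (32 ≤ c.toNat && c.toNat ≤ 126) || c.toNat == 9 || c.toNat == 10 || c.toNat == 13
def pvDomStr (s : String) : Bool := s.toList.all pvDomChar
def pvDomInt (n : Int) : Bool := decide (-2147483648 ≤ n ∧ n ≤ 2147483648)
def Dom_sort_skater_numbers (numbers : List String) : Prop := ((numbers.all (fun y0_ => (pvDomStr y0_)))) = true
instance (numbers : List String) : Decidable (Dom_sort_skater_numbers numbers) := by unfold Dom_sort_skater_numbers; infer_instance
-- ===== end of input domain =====

-- B replaces A's filter + key-decorated library sort (Timsort under the tuple key (0,int(s),s)/(1,s))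
-- by a single pass that binary-searches each kept entry's insertion point in the growing sorted result,
-- deciding order with a direct three-way comparator instead of key tuples (objective: alternative).

-- ===== PORT A =====
-- Python's heterogeneous sort keys (0, int(s), s) / (1, s) are encoded as ONE lexicographically
-- compared List Int (tag, then the int for digit entries, then s's code points): the leading tag
-- decides between the two shapes exactly as Python's first tuple component does, the second slot
-- is int(s) exactly where Python compares it, and the code-point tail compares s exactly as
-- Python compares the strings (encoding exact; proved by the comparison lemmas below).
def pvKeyA (x : String) : List Int :=
  let s := PySem.Chars.strip x.toList
  if PySem.Chars.strIsdigit s then 0 :: (PySem.Int.ofChars? s).getD 0 :: s.map (fun c => (c.toNat : Int))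
  else 1 :: s.map (fun c => (c.toNat : Int))

def sort_skater_numbers (numbers : List String) : List String :=
  let cleaned := numbers.filter (fun n => !(PySem.Chars.strip n.toList == []))
  PySem.List.sorted cleaned (fun x => pvKeyA x) false

-- ===== PORT B =====
-- Source B's _precedes: digit-ness first, then the int value (int(s) is always defined under the
-- isdigit guard, so ofChars? is some there and getD 0 is exact), then the stripped strings
-- (Python str '<' = lexicographic code-point order = List Char '<' on these ASCII strings).
def pvPrecedes (a b : String) : Bool :=
  let sa := PySem.Chars.strip a.toList
  let sb := PySem.Chars.strip b.toList
  let da := PySem.Chars.strIsdigit sa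
  let db := PySem.Chars.strIsdigit sb
  if da != db then da
  else if da && !((PySem.Int.ofChars? sa).getD 0 == (PySem.Int.ofChars? sb).getD 0) then
    decide ((PySem.Int.ofChars? sa).getD 0 < (PySem.Int.ofChars? sb).getD 0)
  else decide (sa < sb)

-- Source B's while-loop binary search: lo, hi, mid are always within [0, len(result)] and mid is a
-- valid index (lo < hi ≤ len), so Python's result[mid] is exactly result.getD mid "" here and
-- (lo+hi)//2 on these nonnegative ints is Nat division.
def pvBisect (s : String) (result : List String) (lo hi : Nat) : Nat :=
  if _h : lo < hi then
    let mid := (lo + hi) / 2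
    if pvPrecedes s (result.getD mid "") then pvBisect s result lo mid
    else pvBisect s result (mid + 1) hi
  else lo
termination_by hi - lo
decreasing_by all_goals omega

-- Source B's result.insert(lo, s): lo returned by the search satisfies 0 ≤ lo ≤ len(result), where
-- Python's list.insert is exactly List.insertIdx.
def sort_skater_numbers_alt (numbers : List String) : List String :=
  numbers.foldl (fun acc n =>
    if PySem.Chars.strip n.toList == [] then acc
    else acc.insertIdx (pvBisect n acc 0 acc.length) n) []

-- ===== PRECONDITION & SPEC =====
def Spec_sort_skater_numbers (numbers : List String) (out : List String) : Prop := out = sort_skater_numbers_alt numbers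
instance (numbers : List String) (out : List String) : Decidable (Spec_sort_skater_numbers numbers out) := by unfold Spec_sort_skater_numbers; infer_instance

-- ===== CLAIM (what is proved, stated in full; the proofs are below) =====
def Claim_equal_sort_skater_numbers : Prop := ∀ (numbers : List String), Dom_sort_skater_numbers numbers → Spec_sort_skater_numbers numbers (sort_skater_numbers numbers)

-- ===== LEMMAS AND PROOFS =====

lemma pvCharCast_lt (a b : Char) : ((a.toNat : Int) < (b.toNat : Int)) ↔ a < b := by
  rw [Char.lt_def, UInt32.lt_iff_toNat_lt, Char.toNat_val a, Char.toNat_val b]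
  omega

lemma pvCharCast_eq (a b : Char) : ((a.toNat : Int) = (b.toNat : Int)) ↔ a = b := by
  constructor
  · intro h
    have h2 : a.toNat = b.toNat := by exact_mod_cast h
    have h3 := Char.ofNat_toNat a
    rw [h2, Char.ofNat_toNat b] at h3
    exact h3.symm
  · rintro rfl; rfl

lemma pvMapCast_lt_iff : ∀ (sa sb : List Char),
    (sa.map (fun c => (c.toNat : Int)) < sb.map (fun c => (c.toNat : Int))) ↔ sa < sb := by
  intro sa
  induction sa with
  | nil =>
    intro sb
    cases sb with
    | nil => exact iff_of_false (List.not_lt_nil _) (List.not_lt_nil _)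
    | cons b sb => exact iff_of_true (List.nil_lt_cons _ _) (List.nil_lt_cons _ _)
  | cons a sa ih =>
    intro sb
    cases sb with
    | nil => exact iff_of_false (List.not_lt_nil _) (List.not_lt_nil _)
    | cons b sb =>
      simp only [List.map_cons, List.cons_lt_cons_iff, pvCharCast_lt, pvCharCast_eq, ih]

-- B's direct comparator agrees with A's encoded tuple key everywhere
lemma pvPrecedes_eq_key (a b : String) :
    pvPrecedes a b = decide (pvKeyA a < pvKeyA b) := by
  unfold pvPrecedes pvKeyA
  by_cases ha : PySem.Chars.strIsdigit (PySem.Chars.strip a.toList) = true <;>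
    by_cases hb : PySem.Chars.strIsdigit (PySem.Chars.strip b.toList) = true
  · -- digit / digit
    simp only [ha, hb, bne_self_eq_false, if_pos, Bool.true_and]
    rcases lt_trichotomy ((PySem.Int.ofChars? (PySem.Chars.strip a.toList)).getD 0)
        ((PySem.Int.ofChars? (PySem.Chars.strip b.toList)).getD 0) with h | h | h
    · simp [List.cons_lt_cons_iff, pvMapCast_lt_iff, h, ne_of_lt h]
    · simp [pvMapCast_lt_iff, h]
    · simp [List.cons_lt_cons_iff, pvMapCast_lt_iff, (ne_of_lt h).symm, not_lt_of_gt h]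
  · simp [ha, hb, List.cons_lt_cons_iff]
  · simp [ha, hb, List.cons_lt_cons_iff]
  · -- text / text
    simp [ha, hb, pvMapCast_lt_iff]

-- 'the position found by the binary search': ∀ j < r, s does not precede acc[j]; if r < len, s precedes acc[r]
lemma pvBisect_spec (s : String) (acc : List String)
    (hmono : ∀ i j, i ≤ j → j < acc.length →
      pvPrecedes s (acc.getD i "") = true → pvPrecedes s (acc.getD j "") = true) :
    ∀ lo hi, lo ≤ hi → hi ≤ acc.length →
      (∀ j, j < lo → pvPrecedes s (acc.getD j "") = false) →
      (∀ j, hi ≤ j → j < acc.length → pvPrecedes s (acc.getD j "") = true) →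
      pvBisect s acc lo hi ≤ acc.length ∧
      (∀ j, j < pvBisect s acc lo hi → pvPrecedes s (acc.getD j "") = false) ∧
      (pvBisect s acc lo hi < acc.length → pvPrecedes s (acc.getD (pvBisect s acc lo hi) "") = true) := by
  intro lo hi
  induction hn : hi - lo using Nat.strong_induction_on generalizing lo hi with
  | _ n ih =>
    intro hlohi hhilen hlo hhi
    rw [pvBisect]
    by_cases h : lo < hi
    · simp only [h, dif_pos]
      by_cases hp : pvPrecedes s (acc.getD ((lo + hi) / 2) "") = true
      · rw [if_pos hp]
        refine ih (((lo + hi) / 2) - lo) (by omega) lo ((lo + hi) / 2) (by omega) (by omega)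
          (by omega) hlo ?_
        intro j hj hjlen
        exact hmono ((lo + hi) / 2) j hj hjlen hp
      · rw [if_neg hp]
        refine ih (hi - ((lo + hi) / 2 + 1)) (by omega) ((lo + hi) / 2 + 1) hi (by omega)
          (by omega) hhilen ?_ hhi
        intro j hj
        by_cases hjlo : j < lo
        · exact hlo j hjlo
        · rcases Bool.eq_false_or_eq_true (pvPrecedes s (acc.getD j "")) with ht | hf
          · exact absurd (hmono j ((lo + hi) / 2) (by omega) (by omega) ht) hp
          · exact hf
    · rw [dif_neg h]
      exact ⟨by omega, hlo, fun hlt => hhi lo (by omega) hlt⟩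

-- inserting at any position with those two properties is exactly insertBy
lemma pvInsertIdx_eq_insertBy (before : String → String → Bool) (s : String) :
    ∀ (acc : List String) (r : Nat), r ≤ acc.length →
      (∀ j, j < r → before s (acc.getD j "") = false) →
      (r < acc.length → before s (acc.getD r "") = true) →
      acc.insertIdx r s = PySem.List.insertBy before s acc := by
  intro acc
  induction acc with
  | nil =>
    intro r hr _ _
    have h0 : r = 0 := Nat.le_zero.mp hr
    subst h0
    rfl
  | cons y ys ih =>
    intro r hr hbelow hat
    cases r with
    | zero =>
      have : before s y = true := by simpa using hat (by simp)
      simp [PySem.List.insertBy, this, List.insertIdx]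
    | succ r' =>
      have h0 : before s y = false := by simpa using hbelow 0 (by omega)
      rw [List.insertIdx_succ_cons]
      simp only [PySem.List.insertBy, h0, Bool.false_eq_true, if_neg, not_false_eq_true]
      congr 1
      refine ih r' (by simpa using hr) (fun j hj => ?_) (fun hlt => ?_)
      · simpa using hbelow (j + 1) (by omega)
      · simpa using hat (by simpa using hlt)

-- insertBy under a linear-order key preserves key-sortedness
lemma pvInsertBy_pairwise (key : String → List Int) (x : String) :
    ∀ (acc : List String), acc.Pairwise (fun a b => key a ≤ key b) →
      (PySem.List.insertBy (fun a b => decide (key a < key b)) x acc).Pairwise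
        (fun a b => key a ≤ key b) := by
  intro acc
  induction acc with
  | nil => intro _; simp [PySem.List.insertBy]
  | cons y ys ih =>
    intro hp
    rw [List.pairwise_cons] at hp
    by_cases h : key x < key y
    · have : ∀ z ∈ y :: ys, key x ≤ key z := by
        intro z hz
        rcases List.mem_cons.1 hz with rfl | hz
        · exact le_of_lt h
        · exact le_of_lt (lt_of_lt_of_le h (hp.1 z hz))
      simp only [PySem.List.insertBy, decide_eq_true_eq, if_pos h]
      exact List.pairwise_cons.2 ⟨this, List.pairwise_cons.2 ⟨hp.1, hp.2⟩⟩
    · have hyx : key y ≤ key x := le_of_not_gt h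
      simp only [PySem.List.insertBy, h, decide_eq_true_eq, if_neg, not_false_eq_true]
      rw [List.pairwise_cons]
      refine ⟨fun z hz => ?_, ih hp.2⟩
      rcases (PySem.List.mem_insertBy _ _ _ _).1 hz with rfl | hz
      · exact hyx
      · exact hp.1 z hz

-- one step of B on a key-sorted accumulator is one step of A's insertion fold
lemma pvStep_eq (s : String) (acc : List String)
    (hp : acc.Pairwise (fun a b => pvKeyA a ≤ pvKeyA b)) :
    acc.insertIdx (pvBisect s acc 0 acc.length) s
      = PySem.List.insertBy (fun a b => decide (pvKeyA a < pvKeyA b)) s acc := by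
  have hmono : ∀ i j, i ≤ j → j < acc.length →
      pvPrecedes s (acc.getD i "") = true → pvPrecedes s (acc.getD j "") = true := by
    intro i j hij hj hi
    rcases eq_or_lt_of_le hij with rfl | hij
    · exact hi
    · have hkey : pvKeyA (acc.getD i "") ≤ pvKeyA (acc.getD j "") := by
        rw [List.getD_eq_getElem acc "" (by omega), List.getD_eq_getElem acc "" hj]
        exact List.pairwise_iff_getElem.1 hp i j (by omega) hj hij
      rw [pvPrecedes_eq_key] at hi ⊢
      exact decide_eq_true (lt_of_lt_of_le (of_decide_eq_true hi) hkey)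
  obtain ⟨h1, h2, h3⟩ := pvBisect_spec s acc hmono 0 acc.length (by omega) le_rfl
    (by omega) (by omega)
  rw [pvInsertIdx_eq_insertBy (fun a b => decide (pvKeyA a < pvKeyA b)) s acc _ h1
    (fun j hj => by
      show decide (pvKeyA s < pvKeyA (acc.getD j "")) = false
      rw [← pvPrecedes_eq_key]; exact h2 j hj)
    (fun hlt => by
      show decide (pvKeyA s < pvKeyA (acc.getD (pvBisect s acc 0 acc.length) "")) = true
      rw [← pvPrecedes_eq_key]; exact h3 hlt)]

lemma pvFold_eq : ∀ (xs acc : List String), acc.Pairwise (fun a b => pvKeyA a ≤ pvKeyA b) →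
    xs.foldl (fun acc n => acc.insertIdx (pvBisect n acc 0 acc.length) n) acc
      = xs.foldl (fun acc n =>
          PySem.List.insertBy (fun a b => decide (pvKeyA a < pvKeyA b)) n acc) acc := by
  intro xs
  induction xs with
  | nil => intro acc _; rfl
  | cons x xs ih =>
    intro acc hp
    simp only [List.foldl_cons, pvStep_eq x acc hp]
    exact ih _ (pvInsertBy_pairwise pvKeyA x acc hp)

-- ===== VERDICT (by name: the statement is the Claim_ definition above) =====
theorem sort_skater_numbers_spec : Claim_equal_sort_skater_numbers := by
  intro numbers _
  unfold Spec_sort_skater_numbers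
  show sort_skater_numbers numbers = sort_skater_numbers_alt numbers
  unfold sort_skater_numbers sort_skater_numbers_alt
  rw [PySem.List.sorted_eq_foldl_insertBy,
    show (fun (acc : List String) n => if PySem.Chars.strip n.toList == [] then acc
          else acc.insertIdx (pvBisect n acc 0 acc.length) n)
        = fun acc n => if (!(PySem.Chars.strip n.toList == [])) = true
            then acc.insertIdx (pvBisect n acc 0 acc.length) n else acc from by
      funext acc n
      by_cases h : PySem.Chars.strip n.toList == [] <;> simp [h],
    ← List.foldl_filter]
  exact (pvFold_eq _ [] (by simp)).symm
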